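-- pv_equiv track=rewrite | github.com/jeongdonggi/baekjoonstudy | 프로그래머스/0/181926. 수 조작하기 1/수 조작하기 1.py | solution
-- ===== SOURCE A (Python) =====
-- def solution(n, control):
--     answer = n
--     chr = ['w','s','d','a']
--     num = [1,-1,10,-10]
--     for col in control:
--         for key, value in enumerate(chr):
--             if col == value:
--                 answer += num[key]
--     return answer
-- ===== SOURCE B (Python) =====
-- def solution(n, control):
--     # divide and conquer: split the string in half, combine the deltas of both halves
--     table = {'w': 1, 's': -1, 'd': 10, 'a': -10}
--
--     def delta(s):
--         if not s:
--             return 0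
--         if len(s) == 1:
--             return table.get(s, 0)
--         m = len(s) // 2
--         return delta(s[:m]) + delta(s[m:])
--
--     return n + delta(control)
-- ===== Notes on version B (the rewrite author's own statement) =====
-- stated objective: alternative
-- what changed: Replaces A's linear loop with an inner key-list scan by a divide-and-conquer recursion that splits the string in half, sums the two halves' deltas, and resolves each single-character leaf by one dict lookup.
import Mathlib
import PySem

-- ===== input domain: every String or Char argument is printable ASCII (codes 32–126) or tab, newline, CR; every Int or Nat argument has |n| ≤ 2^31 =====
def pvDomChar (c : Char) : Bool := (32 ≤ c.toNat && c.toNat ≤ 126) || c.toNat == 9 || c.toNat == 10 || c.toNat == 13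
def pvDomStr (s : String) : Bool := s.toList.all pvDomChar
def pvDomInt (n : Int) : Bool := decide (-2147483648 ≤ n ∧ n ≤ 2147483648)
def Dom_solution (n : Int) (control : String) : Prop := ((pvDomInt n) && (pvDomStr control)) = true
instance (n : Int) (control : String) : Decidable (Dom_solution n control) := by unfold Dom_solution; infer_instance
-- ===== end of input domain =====

-- B replaces A's linear loop (with an inner key-list scan) by a divide-and-conquer
-- recursion over string halves with a dict lookup at single-character leaves (alternative; return value only).

-- ===== PORT A =====
-- inner 'num[key]' indexing: key comes from enumerate over the 4-element list, always in range,
-- so pyGet? is always some; .getD 0 only discharges the Option (exact).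
def solution (n : Int) (control : String) : Int :=
  control.toList.foldl (fun answer col =>
    (PySem.List.enumerate ['w', 's', 'd', 'a']).foldl (fun a kv =>
      if col == kv.2 then a + (PySem.List.pyGet? [(1 : Int), -1, 10, -10] kv.1).getD 0 else a)
      answer) n

-- ===== PORT B =====
def pvTable : PySem.Dict String Int := PySem.Dict.ofList [("w", 1), ("s", -1), ("d", 10), ("a", -10)]

-- s[:m] / s[m:] with 0 ≤ m ≤ len(s) are exactly take/drop (exact on that range of m)
def bDelta (s : List Char) : Int :=
  if s = [] then 0
  else if s.length = 1 then PySem.Dict.getD pvTable (String.ofList s) 0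
  else
    bDelta (s.take (s.length / 2)) + bDelta (s.drop (s.length / 2))
termination_by s.length
decreasing_by
  · have h2 : 2 ≤ s.length := by
      rcases s with _ | ⟨a, _ | ⟨b, t⟩⟩ <;> simp_all <;> omega
    simp [List.length_take]; omega
  · have h2 : 2 ≤ s.length := by
      rcases s with _ | ⟨a, _ | ⟨b, t⟩⟩ <;> simp_all <;> omega
    simp [List.length_drop]; omega

def solution_alt (n : Int) (control : String) : Int :=
  n + bDelta control.toList

-- ===== PRECONDITION & SPEC =====
def Spec_solution (n : Int) (control : String) (out : Int) : Prop := out = solution_alt n control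
instance (n : Int) (control : String) (out : Int) : Decidable (Spec_solution n control out) := by unfold Spec_solution; infer_instance

-- ===== CLAIM (what is proved, stated in full; the proofs are below) =====
def Claim_equal_solution : Prop := ∀ (n : Int) (control : String), Dom_solution n control → Spec_solution n control (solution n control)

-- ===== LEMMAS AND PROOFS =====

-- the common semantics both programs compute per character
def wChar (c : Char) : Int :=
  if c = 'w' then 1 else if c = 's' then -1 else if c = 'd' then 10 else if c = 'a' then -10 else 0

lemma str_beq_single (d c : Char) : (String.ofList [d] == String.ofList [c]) = (d == c) := by
  by_cases h : d = c
  · subst h; simp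
  · have h2 : String.ofList [d] ≠ String.ofList [c] := by
      intro hc; exact h (by simpa using congrArg String.toList hc)
    simp [h, h2]

lemma dict_lookup_eq_wChar (c : Char) :
    PySem.Dict.getD pvTable (String.ofList [c]) 0 = wChar c := by
  rw [PySem.Dict.getD_eq_get?_getD]
  have hmk : pvTable = PySem.Dict.mk [("w",1),("s",-1),("d",10),("a",-10)] := rfl
  rw [hmk]
  simp only [PySem.Dict.get?_mk_cons,
    show ("w":String) = String.ofList ['w'] from rfl,
    show ("s":String) = String.ofList ['s'] from rfl,
    show ("d":String) = String.ofList ['d'] from rfl,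
    show ("a":String) = String.ofList ['a'] from rfl,
    str_beq_single, beq_iff_eq]
  unfold wChar
  by_cases hw : c = 'w' <;> by_cases hs : c = 's' <;> by_cases hd : c = 'd' <;>
    by_cases ha : c = 'a' <;> simp_all [PySem.Dict.get?, Option.getD] <;> simp_all [eq_comm]

lemma bDelta_eq_sum : ∀ (fuel : Nat) (l : List Char), l.length ≤ fuel →
    bDelta l = (l.map wChar).sum := by
  intro fuel
  induction fuel with
  | zero =>
    intro l h
    have h0 : l = [] := by cases l <;> simp_all
    simp [h0, bDelta]
  | succ m ih =>
    intro l h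
    rw [bDelta]
    by_cases h0 : l = []
    · simp [h0]
    · by_cases h1 : l.length = 1
      · rcases l with _ | ⟨c, _ | _⟩ <;> simp_all [dict_lookup_eq_wChar]
      · have h2 : 2 ≤ l.length := by
          rcases l with _ | ⟨a, _ | ⟨b, t⟩⟩ <;> simp_all <;> omega
        simp only [h0, h1, if_false]
        rw [ih _ (by simp [List.length_take]; omega),
            ih _ (by simp [List.length_drop]; omega)]
        rw [← List.sum_append, ← List.map_append, List.take_append_drop]

-- A's inner fold over the enumerated key list adds exactly wChar col
lemma inner_fold_eq (a : Int) (col : Char) :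
    (PySem.List.enumerate ['w', 's', 'd', 'a']).foldl (fun a kv =>
      if col == kv.2 then a + (PySem.List.pyGet? [(1 : Int), -1, 10, -10] kv.1).getD 0 else a)
      a = a + wChar col := by
  by_cases hw : col = 'w' <;> by_cases hs : col = 's' <;> by_cases hd : col = 'd' <;>
    by_cases ha : col = 'a' <;>
    simp_all [PySem.List.enumerate, PySem.List.pyGet?, PySem.List.pyIdx?, wChar, List.foldl]

lemma solution_foldl (l : List Char) (n : Int) :
    l.foldl (fun answer col =>
      (PySem.List.enumerate ['w', 's', 'd', 'a']).foldl (fun a kv =>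
        if col == kv.2 then a + (PySem.List.pyGet? [(1 : Int), -1, 10, -10] kv.1).getD 0 else a)
        answer) n
    = n + (l.map wChar).sum := by
  induction l generalizing n with
  | nil => simp
  | cons c t ih =>
    rw [List.foldl_cons, inner_fold_eq, ih, List.map_cons, List.sum_cons]; ring

-- ===== VERDICT (by name: the statement is the Claim_ definition above) =====
theorem solution_spec : Claim_equal_solution := by
  intro n control _
  show solution n control = solution_alt n control
  unfold solution solution_alt
  rw [solution_foldl, bDelta_eq_sum control.toList.length control.toList le_rfl]
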